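-- pv_equiv track=rewrite | github.com/marncat/tiling-case-calculator | backtrack.py | backtrack_one
-- ===== SOURCE A (Python) =====
-- from itertools import product
-- from typing import List, Tuple
--
-- def normalize(shape):
--     """Generate normalized shape for uniqueness."""
--     shape.sort()
--     min_x, min_y = shape[0]
--     return [(x - min_x, y - min_y) for x, y in shape]
--
-- def generate_transformations(shape):
--     """Generate all transformations (rotations and flips)."""
--     unique_shapes = set()
--
--     # Generate rotations
--     for _ in range(4):
--         shape = normalize(shape)
--         unique_shapes.add(tuple(shape))
--         shape = [(-y, x) for x, y in shape]  # 90-degree rotation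
--
--     # Flip horizontally and check rotations again
--     shape = [(x, -y) for x, y in shape]
--     for _ in range(4):
--         shape = normalize(shape)
--         unique_shapes.add(tuple(shape))
--         shape = [(-y, x) for x, y in shape]  # 90-degree rotation
--
--     return unique_shapes
--
-- def can_place(x, y, shape, board):
--     """Check if a piece can be placed."""
--     for dx, dy in shape:
--         nx, ny = x + dx, y + dy
--         if nx < 0 or ny < 0 or nx >= len(board) or ny >= len(board[0]) or board[nx][ny] != 1:
--             return False
--     return True
--
-- def place_piece(x, y, shape, board, value):
--     """Place or remove a piece."""
--     for dx, dy in shape: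
--         nx, ny = x + dx, y + dy
--         board[nx][ny] = value
--
-- def backtrack(piece_index, board, pieces: List[List[Tuple[int, int]]], solution_count):
--     """Backtracking algorithm."""
--     if piece_index == len(pieces):
--         solution_count[0] += 1
--         if solution_count[0] >= 10_000_000:
--             solution_count[1] = True
--         return
--
--     piece = pieces[piece_index]
--     unique_shapes = generate_transformations(piece)
--
--     for shape in unique_shapes:
--         for x, y in product(range(len(board)), range(len(board[0]))):
--             if can_place(x, y, shape, board):
--                 place_piece(x, y, shape, board, 2)  # Mark placement
--                 backtrack(piece_index + 1, board, pieces, solution_count)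
--                 if solution_count[1]:
--                     return
--                 place_piece(x, y, shape, board, 1)  # Remove placement
--
-- def backtrack_one(board: List[List[int]], piece: List[List[int]]):
--     solution_count = [0, False]  # [count, max_check]
--
--     piece_for_backtrack: List[Tuple[int, int]] = []
--     for x, y in product(range(len(piece)), range(len(piece[0]))):
--         if piece[x][y] == 1:
--             piece_for_backtrack.append((x, y))
--
--     backtrack(0, board, [piece_for_backtrack], solution_count)
--     return solution_count[0]
-- ===== SOURCE B (Python) =====
-- def normalize(shape):
--     shape.sort()
--     min_x, min_y = shape[0]
--     return [(x - min_x, y - min_y) for x, y in shape]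
--
--
-- def generate_transformations(shape):
--     unique_shapes = set()
--     for _ in range(4):
--         shape = normalize(shape)
--         unique_shapes.add(tuple(shape))
--         shape = [(-y, x) for x, y in shape]
--     shape = [(x, -y) for x, y in shape]
--     for _ in range(4):
--         shape = normalize(shape)
--         unique_shapes.add(tuple(shape))
--         shape = [(-y, x) for x, y in shape]
--     return unique_shapes
--
--
-- def backtrack_one(board, piece):
--     cells = [(x, y) for x in range(len(piece)) for y in range(len(piece[0]))
--              if piece[x][y] == 1]
--     shapes = generate_transformations(cells)
--     h, w = len(board), len(board[0])
--     free = {(i, j) for i in range(h) for j in range(w) if board[i][j] == 1}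
--     total = sum(1 for shape in shapes
--                 for x in range(h) for y in range(w)
--                 if all((x + dx, y + dy) in free for dx, dy in shape))
--     return min(total, 10_000_000)
-- ===== Notes on version B (the rewrite author's own statement) =====
-- stated objective: simpler
-- what changed: B drops the one-piece backtracking recursion, the board mark/restore mutation and the cap flag: it counts, for each unique transformed shape and each board position, whether every shape cell lands in a precomputed set of free cells, and caps the total with min(total, 10_000_000).
import Mathlib
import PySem

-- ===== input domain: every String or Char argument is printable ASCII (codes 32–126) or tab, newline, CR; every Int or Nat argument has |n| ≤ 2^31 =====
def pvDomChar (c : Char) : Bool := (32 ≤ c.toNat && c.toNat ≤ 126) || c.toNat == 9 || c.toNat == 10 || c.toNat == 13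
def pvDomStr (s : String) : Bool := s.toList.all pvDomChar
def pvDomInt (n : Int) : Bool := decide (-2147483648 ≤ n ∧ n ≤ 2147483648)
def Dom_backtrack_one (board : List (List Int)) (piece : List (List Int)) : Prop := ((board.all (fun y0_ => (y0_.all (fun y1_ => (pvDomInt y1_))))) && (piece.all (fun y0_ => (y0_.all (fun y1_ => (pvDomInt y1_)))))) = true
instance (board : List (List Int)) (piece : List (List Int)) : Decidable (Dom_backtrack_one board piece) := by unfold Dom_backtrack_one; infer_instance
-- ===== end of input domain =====

-- B removes the trivial one-piece recursion, the board mark/restore mutation and the cap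
-- flag: it counts fits of each transformed shape against a precomputed set of free cells and
-- caps the count with min.  A mutates its board argument in place (and can leave it marked
-- when the 10_000_000 cap fires); the equivalence proved here is about the RETURN value only.

-- ===== PORT A =====
def pvRot90 (p : Int × Int) : Int × Int := (-p.2, p.1)

def pvNormalize (shape : List (Int × Int)) : List (Int × Int) :=
  let s := PySem.List.sorted2 shape (fun p => p.1) (fun p => p.2) false
  let m := PySem.List.pyGetD s 0 (0, 0)
  s.map (fun p => (p.1 - m.1, p.2 - m.2))

def pvGenStep (st : PySem.Set (List (Int × Int)) × List (Int × Int)) (_ : Nat) :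
    PySem.Set (List (Int × Int)) × List (Int × Int) :=
  let sh := pvNormalize st.2
  (PySem.Set.add st.1 sh, sh.map pvRot90)

def generateTransformations (shape : List (Int × Int)) : PySem.Set (List (Int × Int)) :=
  let r1 := (List.range 4).foldl pvGenStep (PySem.Set.empty, shape)
  let sh2 := r1.2.map (fun p => (p.1, -p.2))
  ((List.range 4).foldl pvGenStep (r1.1, sh2)).1

def pvGet2 (b : List (List Int)) (i j : Int) : Int :=
  PySem.List.pyGetD (PySem.List.pyGetD b i []) j 0

def pvSet2 (b : List (List Int)) (i j : Int) (v : Int) : List (List Int) :=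
  PySem.List.pySetD b i (PySem.List.pySetD (PySem.List.pyGetD b i []) j v)

def canPlace (x y : Int) (shape : List (Int × Int)) (board : List (List Int)) : Bool :=
  shape.all (fun d =>
    let nx := x + d.1
    let ny := y + d.2
    !(decide (nx < 0) || decide (ny < 0) || decide ((board.length : Int) ≤ nx) ||
      decide (((PySem.List.pyGetD board 0 []).length : Int) ≤ ny) || (pvGet2 board nx ny != 1)))

def placePiece (x y : Int) (shape : List (Int × Int)) (board : List (List Int)) (v : Int) :
    List (List Int) :=
  shape.foldl (fun b d => pvSet2 b (x + d.1) (y + d.2) v) board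

def pvPositions (board : List (List Int)) : List (Int × Int) :=
  (PySem.List.pyRange 0 (board.length : Int) 1).flatMap (fun x =>
    (PySem.List.pyRange 0 ((PySem.List.pyGetD board 0 []).length : Int) 1).map (fun y => (x, y)))

def pvBtk (board : List (List Int)) (pieces : List (List (Int × Int))) (sc : Int × Bool) :
    List (List Int) × (Int × Bool) :=
  match pieces with
  | [] =>
      let c := sc.1 + 1
      (board, (c, if (10000000 : Int) ≤ c then true else sc.2))
  | piece :: rest =>
      let shapes := generateTransformations piece
      shapes.foldl (fun s sh =>
        if s.2.2 then s else
        (pvPositions s.1).foldl (fun s2 xy =>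
          if s2.2.2 then s2 else
          if canPlace xy.1 xy.2 sh s2.1 then
            let b2 := placePiece xy.1 xy.2 sh s2.1 2
            let r := pvBtk b2 rest s2.2
            if r.2.2 then r else (placePiece xy.1 xy.2 sh r.1 1, r.2)
          else s2) s) (board, sc)

def backtrack_one (board : List (List Int)) (piece : List (List Int)) : Int :=
  let w := ((PySem.List.pyGetD piece 0 []).length : Int)
  let cells := ((PySem.List.pyRange 0 (piece.length : Int) 1).flatMap (fun x =>
      (PySem.List.pyRange 0 w 1).map (fun y => (x, y)))).foldl
    (fun acc xy => if pvGet2 piece xy.1 xy.2 == 1 then acc ++ [xy] else acc) []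
  (pvBtk board [cells] (0, false)).2.1

-- ===== PORT B =====
def backtrack_one_alt (board : List (List Int)) (piece : List (List Int)) : Int :=
  let wp := ((PySem.List.pyGetD piece 0 []).length : Int)
  let cells := (PySem.List.pyRange 0 (piece.length : Int) 1).flatMap (fun x =>
    ((PySem.List.pyRange 0 wp 1).filter (fun y => pvGet2 piece x y == 1)).map (fun y => (x, y)))
  let shapes := generateTransformations cells
  let h := (board.length : Int)
  let w := ((PySem.List.pyGetD board 0 []).length : Int)
  let free := PySem.Set.ofList ((PySem.List.pyRange 0 h 1).flatMap (fun i =>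
    ((PySem.List.pyRange 0 w 1).filter (fun j => pvGet2 board i j == 1)).map (fun j => (i, j))))
  let total := shapes.foldl (fun t sh =>
    t + (((PySem.List.pyRange 0 h 1).flatMap (fun x =>
          (PySem.List.pyRange 0 w 1).map (fun y => (x, y)))).countP
        (fun xy => sh.all (fun d => free.contains (xy.1 + d.1, xy.2 + d.2))) : Int)) 0
  min total 10000000

-- ===== PRECONDITION & SPEC =====
-- Pre_ excludes exactly the inputs on which A raises: an empty board or piece (len(x[0])
-- raises IndexError), a row shorter than the first row's width (piece[x][y] / board[x][y]
-- raises IndexError while scanning), and a piece with no 1-cell in the scanned region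
-- (normalize does shape[0] on an empty list: IndexError).
def Pre_backtrack_one (board : List (List Int)) (piece : List (List Int)) : Prop :=
  board ≠ [] ∧ (∀ row ∈ board, (board.headD []).length ≤ row.length) ∧
  piece ≠ [] ∧ (∀ row ∈ piece, (piece.headD []).length ≤ row.length) ∧
  ∃ row ∈ piece, 1 ∈ row.take (piece.headD []).length
instance (board : List (List Int)) (piece : List (List Int)) : Decidable (Pre_backtrack_one board piece) := by unfold Pre_backtrack_one; infer_instance

def pvWitness_backtrack_one : List (List Int) × List (List Int) := ([[1, 1], [0, 1]], [[1, 1]])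

def Spec_backtrack_one (board : List (List Int)) (piece : List (List Int)) (out : Int) : Prop := out = backtrack_one_alt board piece
instance (board : List (List Int)) (piece : List (List Int)) (out : Int) : Decidable (Spec_backtrack_one board piece out) := by unfold Spec_backtrack_one; infer_instance

-- ===== CLAIM (what is proved, stated in full; the proofs are below) =====
def Claim_equal_backtrack_one : Prop := ∀ (board : List (List Int)) (piece : List (List Int)), Dom_backtrack_one board piece → Pre_backtrack_one board piece → Spec_backtrack_one board piece (backtrack_one board piece)

-- ===== LEMMAS AND PROOFS =====

-- ===== LEMMAS AND PROOFS =====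

-- bridge to Nat-indexed views
theorem pyGetD_nn {α : Type} (xs : List α) (i : Int) (d : α) (h : 0 ≤ i) :
    PySem.List.pyGetD xs i d = xs.getD i.toNat d := by
  simp [PySem.List.pyGetD, PySem.List.pyGet?_of_nonneg xs h, List.getD_eq_getElem?_getD]

theorem pvGet2_nn (b : List (List Int)) (p q : Int) (hp : 0 ≤ p) (hq : 0 ≤ q) :
    pvGet2 b p q = (b.getD p.toNat []).getD q.toNat 0 := by
  simp [pvGet2, pyGetD_nn _ _ _ hp, pyGetD_nn _ _ _ hq]

theorem pvSet2_nn (b : List (List Int)) (i j v : Int) (hi : 0 ≤ i) (hj : 0 ≤ j) :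
    pvSet2 b i j v = b.set i.toNat ((b.getD i.toNat []).set j.toNat v) := by
  simp [pvSet2, PySem.List.pySetD_of_nonneg _ _ hi, PySem.List.pySetD_of_nonneg _ _ hj,
    pyGetD_nn _ _ _ hi]

theorem getD_set_list {α : Type} (l : List α) (J : Nat) (v : α) (Q : Nat) (d : α) :
    (l.set J v).getD Q d = if Q = J ∧ J < l.length then v else l.getD Q d := by
  by_cases h : Q = J
  · subst h
    by_cases hl : Q < l.length
    · simp [List.getD_eq_getElem?_getD, hl]
    · simp [List.getD_eq_getElem?_getD, hl]
  · simp [List.getD_eq_getElem?_getD, Ne.symm h, h]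

theorem getD_set2_row (b : List (List Int)) (I J : Nat) (v : Int) (P : Nat) :
    ((b.set I ((b.getD I []).set J v)).getD P []).length = (b.getD P []).length := by
  rw [getD_set_list]
  by_cases h : P = I ∧ I < b.length
  · rw [if_pos h]
    simp [h.1]
  · rw [if_neg h]

theorem getD_set2_get (b : List (List Int)) (I J : Nat) (v : Int) (P Q : Nat) :
    ((b.set I ((b.getD I []).set J v)).getD P []).getD Q 0
      = if P = I ∧ Q = J ∧ I < b.length ∧ J < (b.getD I []).length then v
        else (b.getD P []).getD Q 0 := by
  rw [getD_set_list]
  by_cases h : P = I ∧ I < b.length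
  · rw [if_pos h]
    obtain ⟨rfl, hI⟩ := h
    rw [getD_set_list]
    by_cases h2 : Q = J ∧ J < (b.getD P []).length
    · rw [if_pos h2, if_pos ⟨rfl, h2.1, hI, h2.2⟩]
    · rw [if_neg h2, if_neg (by tauto)]
  · rw [if_neg h, if_neg (by tauto)]

def pvValid (b : List (List Int)) (x y : Int) (sh : List (Int × Int)) : Prop :=
  ∀ d ∈ sh, 0 ≤ x + d.1 ∧ (x + d.1).toNat < b.length ∧ 0 ≤ y + d.2 ∧
    (y + d.2).toNat < (b.getD (x + d.1).toNat []).length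

theorem place_props (x y v : Int) (sh : List (Int × Int)) : ∀ (b : List (List Int)),
    pvValid b x y sh →
    (placePiece x y sh b v).length = b.length ∧
    (∀ P : Nat, ((placePiece x y sh b v).getD P []).length = (b.getD P []).length) ∧
    (∀ P Q : Nat, ((placePiece x y sh b v).getD P []).getD Q 0 =
      if ∃ d ∈ sh, P = (x + d.1).toNat ∧ Q = (y + d.2).toNat then v
      else (b.getD P []).getD Q 0) := by
  induction sh with
  | nil => intro b _; simp [placePiece]
  | cons d t ih =>
    intro b hv
    obtain ⟨hd1, hd2, hd3, hd4⟩ := hv d (by simp)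
    have hstep : placePiece x y (d :: t) b v
        = placePiece x y t (b.set (x + d.1).toNat ((b.getD (x + d.1).toNat []).set (y + d.2).toNat v)) v := by
      simp [placePiece, pvSet2_nn b _ _ v hd1 hd3]
    set b' := b.set (x + d.1).toNat ((b.getD (x + d.1).toNat []).set (y + d.2).toNat v) with hb'
    have hlen' : b'.length = b.length := by simp [hb']
    have hrow' : ∀ P : Nat, (b'.getD P []).length = (b.getD P []).length := fun P =>
      getD_set2_row b _ _ v P
    have hv' : pvValid b' x y t := by
      intro e he
      obtain ⟨h1, h2, h3, h4⟩ := hv e (by simp [he])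
      exact ⟨h1, by omega, h3, by rw [hrow']; exact h4⟩
    obtain ⟨l1, l2, l3⟩ := ih b' hv'
    rw [hstep]
    refine ⟨by rw [l1, hlen'], fun P => by rw [l2, hrow'], fun P Q => ?_⟩
    rw [l3 P Q, hb', getD_set2_get]
    by_cases hmem : ∃ e ∈ t, P = (x + e.1).toNat ∧ Q = (y + e.2).toNat
    · have hcons : ∃ e ∈ d :: t, P = (x + e.1).toNat ∧ Q = (y + e.2).toNat := by
        obtain ⟨e, he, hh⟩ := hmem; exact ⟨e, by simp [he], hh⟩
      rw [if_pos hmem, if_pos hcons]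
    · rw [if_neg hmem]
      by_cases hdm : P = (x + d.1).toNat ∧ Q = (y + d.2).toNat
      · have hcons : ∃ e ∈ d :: t, P = (x + e.1).toNat ∧ Q = (y + e.2).toNat :=
          ⟨d, by simp, hdm⟩
        rw [if_pos ⟨hdm.1, hdm.2, hd2, hd4⟩, if_pos hcons]
      · have hncons : ¬ ∃ e ∈ d :: t, P = (x + e.1).toNat ∧ Q = (y + e.2).toNat := by
          rintro ⟨e, he, hh⟩
          rcases List.mem_cons.mp he with rfl | he'
          · exact hdm hh
          · exact hmem ⟨e, he', hh⟩
        rw [if_neg (by tauto), if_neg hncons]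

theorem ext2 (b b' : List (List Int)) (hl : b'.length = b.length)
    (hr : ∀ P : Nat, (b'.getD P []).length = (b.getD P []).length)
    (hg : ∀ P Q : Nat, (b'.getD P []).getD Q 0 = (b.getD P []).getD Q 0) : b' = b := by
  apply List.ext_getElem hl
  intro k h1 h2
  have hrk := hr k
  simp only [List.getD_eq_getElem?_getD, List.getElem?_eq_getElem, h1, h2, Option.getD_some] at hrk
  apply List.ext_getElem hrk
  intro j hj1 hj2
  have hgk := hg k j
  simp only [List.getD_eq_getElem?_getD, List.getElem?_eq_getElem, h1, h2, Option.getD_some,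
    List.getElem?_eq_getElem, hj1, hj2] at hgk
  exact hgk

theorem getD_zero_headD (b : List (List Int)) : b.getD 0 [] = b.headD [] := by
  cases b <;> rfl

theorem canPlace_iff (x y : Int) (sh : List (Int × Int)) (b : List (List Int)) :
    canPlace x y sh b = true ↔ ∀ d ∈ sh, 0 ≤ x + d.1 ∧ x + d.1 < (b.length : Int) ∧
      0 ≤ y + d.2 ∧ y + d.2 < (((PySem.List.pyGetD b 0 []).length : Int)) ∧
      pvGet2 b (x + d.1) (y + d.2) = 1 := by
  simp only [canPlace, List.all_eq_true]
  constructor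
  · intro h d hd
    have := h d hd
    simp only [Bool.not_eq_true', Bool.or_eq_false_iff, decide_eq_false_iff_not, not_lt,
      bne_eq_false_iff_eq] at this
    obtain ⟨⟨⟨⟨h1, h2⟩, h3⟩, h4⟩, h5⟩ := this
    exact ⟨by omega, by omega, by omega, by omega, h5⟩
  · intro h d hd
    obtain ⟨h1, h2, h3, h4, h5⟩ := h d hd
    simp only [Bool.not_eq_true', Bool.or_eq_false_iff, decide_eq_false_iff_not, not_lt,
      bne_eq_false_iff_eq]
    exact ⟨⟨⟨⟨by omega, by omega⟩, by omega⟩, by omega⟩, h5⟩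

theorem valid_of_canPlace (b : List (List Int))
    (hb : ∀ row ∈ b, (b.headD []).length ≤ row.length)
    (x y : Int) (sh : List (Int × Int)) (h : canPlace x y sh b = true) :
    pvValid b x y sh := by
  intro d hd
  obtain ⟨h1, h2, h3, h4, _⟩ := (canPlace_iff x y sh b).mp h d hd
  have hPlt : (x + d.1).toNat < b.length := by omega
  have hrow : b.getD (x + d.1).toNat [] ∈ b := by
    rw [List.getD_eq_getElem?_getD, List.getElem?_eq_getElem hPlt]
    exact List.getElem_mem _
  have hW : (PySem.List.pyGetD b 0 []).length ≤ (b.getD (x + d.1).toNat []).length := by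
    rw [pyGetD_nn b 0 [] le_rfl]
    simp only [Int.toNat_zero, getD_zero_headD]
    exact hb _ hrow
  exact ⟨h1, hPlt, h3, by omega⟩

theorem restore (b : List (List Int))
    (hb : ∀ row ∈ b, (b.headD []).length ≤ row.length)
    (x y : Int) (sh : List (Int × Int)) (h : canPlace x y sh b = true) :
    placePiece x y sh (placePiece x y sh b 2) 1 = b := by
  have hv := valid_of_canPlace b hb x y sh h
  obtain ⟨p1, p2, p3⟩ := place_props x y 2 sh b hv
  have hv2 : pvValid (placePiece x y sh b 2) x y sh := by
    intro d hd
    obtain ⟨h1, h2, h3, h4⟩ := hv d hd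
    exact ⟨h1, by omega, h3, by rw [p2]; exact h4⟩
  obtain ⟨q1, q2, q3⟩ := place_props x y 1 sh (placePiece x y sh b 2) hv2
  apply ext2
  · rw [q1, p1]
  · intro P; rw [q2, p2]
  · intro P Q
    rw [q3, p3]
    by_cases hmem : ∃ d ∈ sh, P = (x + d.1).toNat ∧ Q = (y + d.2).toNat
    · obtain ⟨d, hd, rfl, rfl⟩ := hmem
      obtain ⟨h1, _, h3, _, h5⟩ := (canPlace_iff x y sh b).mp h d hd
      rw [pvGet2_nn b _ _ h1 h3] at h5
      have hx : ∃ e ∈ sh, (x + d.1).toNat = (x + e.1).toNat ∧ (y + d.2).toNat = (y + e.2).toNat :=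
        ⟨d, hd, rfl, rfl⟩
      rw [if_pos hx]
      exact h5.symm
    · simp [hmem]

-- proof-side names for the loop bodies of pvBtk at the last piece
def iStep (sh : List (Int × Int)) (s2 : List (List Int) × (Int × Bool)) (xy : Int × Int) :
    List (List Int) × (Int × Bool) :=
  if s2.2.2 then s2 else
  if canPlace xy.1 xy.2 sh s2.1 then
    let b2 := placePiece xy.1 xy.2 sh s2.1 2
    let c := s2.2.1 + 1
    let r : List (List Int) × (Int × Bool) := (b2, (c, if (10000000 : Int) ≤ c then true else s2.2.2))
    if r.2.2 then r else (placePiece xy.1 xy.2 sh r.1 1, r.2)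
  else s2

def oStep (s : List (List Int) × (Int × Bool)) (sh : List (Int × Int)) :
    List (List Int) × (Int × Bool) :=
  if s.2.2 then s else (pvPositions s.1).foldl (iStep sh) s

theorem btk_eq (b : List (List Int)) (cells : List (Int × Int)) (sc : Int × Bool) :
    pvBtk b [cells] sc = (generateTransformations cells).foldl oStep (b, sc) := by
  show (generateTransformations cells).foldl _ (b, sc) = _
  congr 1

theorem iStep_flag (sh : List (Int × Int)) (s : List (List Int) × (Int × Bool)) (xy : Int × Int)
    (h : s.2.2 = true) : iStep sh s xy = s := by
  simp [iStep, h]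

theorem skip_inner (sh : List (Int × Int)) (l : List (Int × Int))
    (s : List (List Int) × (Int × Bool)) (h : s.2.2 = true) : l.foldl (iStep sh) s = s := by
  induction l with
  | nil => rfl
  | cons a t ih => rw [List.foldl_cons, iStep_flag sh s a h]; exact ih

theorem oStep_flag (s : List (List Int) × (Int × Bool)) (sh : List (Int × Int))
    (h : s.2.2 = true) : oStep s sh = s := by
  simp [oStep, h]

theorem skip_outer (l : List (List (Int × Int))) (s : List (List Int) × (Int × Bool))
    (h : s.2.2 = true) : l.foldl oStep s = s := by
  induction l with
  | nil => rfl
  | cons a t ih => rw [List.foldl_cons, oStep_flag s a h]; exact ih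

theorem inner_char (b : List (List Int))
    (hb : ∀ row ∈ b, (b.headD []).length ≤ row.length) (sh : List (Int × Int)) :
    ∀ (l : List (Int × Int)) (c : Int), 0 ≤ c → c < 10000000 →
    (l.foldl (iStep sh) (b, (c, false))).2.1
        = min (c + (l.countP (fun xy => canPlace xy.1 xy.2 sh b) : Int)) 10000000 ∧
    (l.foldl (iStep sh) (b, (c, false))).2.2
        = decide (10000000 ≤ c + (l.countP (fun xy => canPlace xy.1 xy.2 sh b) : Int)) ∧
    ((l.foldl (iStep sh) (b, (c, false))).2.2 = false →
      (l.foldl (iStep sh) (b, (c, false))).1 = b) := by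
  intro l
  induction l with
  | nil =>
    intro c h0 hlt
    refine ⟨by simp; omega, by simp; omega, fun _ => rfl⟩
  | cons xy t ih =>
    intro c h0 hlt
    rw [List.foldl_cons]
    by_cases hcp : canPlace xy.1 xy.2 sh b = true
    · have hstep : iStep sh (b, (c, false)) xy
          = if (10000000 : Int) ≤ c + 1
            then (placePiece xy.1 xy.2 sh b 2, (c + 1, true))
            else (b, (c + 1, false)) := by
        by_cases hcap : (10000000 : Int) ≤ c + 1
        · simp [iStep, hcp, hcap]
        · simp [iStep, hcp, hcap, restore b hb xy.1 xy.2 sh hcp]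
      by_cases hcap : (10000000 : Int) ≤ c + 1
      · rw [hstep, if_pos hcap, skip_inner sh t _ rfl]
        have hcnt : (0 : Int) ≤ (t.countP (fun xy => canPlace xy.1 xy.2 sh b) : Int) :=
          Int.natCast_nonneg _
        refine ⟨?_, ?_, fun hf => by simp at hf⟩
        · simp only [List.countP_cons, hcp, if_true]
          push_cast
          omega
        · simp only [List.countP_cons, hcp, if_true]
          symm
          apply decide_eq_true
          push_cast
          omega
      · rw [hstep, if_neg hcap]
        obtain ⟨i1, i2, i3⟩ := ih (c + 1) (by omega) (by omega)
        refine ⟨?_, ?_, i3⟩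
        · rw [i1]
          simp only [List.countP_cons, hcp, if_true]
          push_cast
          omega
        · rw [i2]
          simp only [List.countP_cons, hcp, if_true]
          apply decide_eq_decide.mpr
          push_cast
          omega
    · have hstep : iStep sh (b, (c, false)) xy = (b, (c, false)) := by
        simp [iStep, hcp]
      rw [hstep]
      obtain ⟨i1, i2, i3⟩ := ih c h0 hlt
      refine ⟨?_, ?_, i3⟩
      · rw [i1]
        simp only [List.countP_cons, hcp, if_false, Bool.false_eq_true]
        push_cast
        omega
      · rw [i2]
        simp only [List.countP_cons, hcp, if_false, Bool.false_eq_true]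
        apply decide_eq_decide.mpr
        push_cast
        omega

theorem outer_char (b : List (List Int))
    (hb : ∀ row ∈ b, (b.headD []).length ≤ row.length) :
    ∀ (shs : List (List (Int × Int))) (c : Int), 0 ≤ c → c < 10000000 →
    (shs.foldl oStep (b, (c, false))).2.1
        = min (c + (shs.map (fun sh =>
            ((pvPositions b).countP (fun xy => canPlace xy.1 xy.2 sh b) : Int))).sum) 10000000 ∧
    (shs.foldl oStep (b, (c, false))).2.2
        = decide (10000000 ≤ c + (shs.map (fun sh =>
            ((pvPositions b).countP (fun xy => canPlace xy.1 xy.2 sh b) : Int))).sum) := by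
  intro shs
  induction shs with
  | nil =>
    intro c h0 hlt
    refine ⟨by simp; omega, by simp; omega⟩
  | cons sh rest ih =>
    intro c h0 hlt
    rw [List.foldl_cons]
    have hos : oStep (b, (c, false)) sh = (pvPositions b).foldl (iStep sh) (b, (c, false)) := by
      simp [oStep]
    obtain ⟨i1, i2, i3⟩ := inner_char b hb sh (pvPositions b) c h0 hlt
    set cnt : Int := ((pvPositions b).countP (fun xy => canPlace xy.1 xy.2 sh b) : Int) with hcnt
    have hcnt0 : (0 : Int) ≤ cnt := Int.natCast_nonneg _
    have hsum0 : (0 : Int) ≤ (rest.map (fun sh =>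
        ((pvPositions b).countP (fun xy => canPlace xy.1 xy.2 sh b) : Int))).sum := by
      apply List.sum_nonneg
      intro z hz
      simp only [List.mem_map] at hz
      obtain ⟨sh', _, rfl⟩ := hz
      exact Int.natCast_nonneg _
    by_cases hf : ((pvPositions b).foldl (iStep sh) (b, (c, false))).2.2 = true
    · rw [hos, skip_outer rest _ hf]
      have hge : (10000000 : Int) ≤ c + cnt := by
        rw [i2] at hf; exact of_decide_eq_true hf
      refine ⟨?_, ?_⟩
      · rw [i1]; simp [List.map_cons, List.sum_cons]; omega
      · rw [hf]; simp [List.map_cons, List.sum_cons]; omega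
    · have hflag : ((pvPositions b).foldl (iStep sh) (b, (c, false))).2.2 = false := by
        simpa using hf
      have hlt' : c + cnt < 10000000 := by
        rw [i2] at hflag
        have := of_decide_eq_false hflag; omega
      have hst : (pvPositions b).foldl (iStep sh) (b, (c, false)) = (b, (c + cnt, false)) := by
        have h1 : ((pvPositions b).foldl (iStep sh) (b, (c, false))).1 = b := i3 hflag
        have h2 : ((pvPositions b).foldl (iStep sh) (b, (c, false))).2.1 = c + cnt := by
          rw [i1]; omega
        have h3 := hflag
        rw [Prod.ext_iff, Prod.ext_iff]
        exact ⟨h1, h2, h3⟩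
      rw [hos, hst]
      obtain ⟨o1, o2⟩ := ih (c + cnt) (by omega) hlt'
      refine ⟨?_, ?_⟩
      · rw [o1]; simp [List.map_cons, List.sum_cons]; omega
      · rw [o2]; simp [List.map_cons, List.sum_cons]; omega

theorem mem_freelist (b : List (List Int)) (p q : Int) :
    ((p, q) ∈ (PySem.List.pyRange 0 (b.length : Int) 1).flatMap (fun i =>
        ((PySem.List.pyRange 0 ((PySem.List.pyGetD b 0 []).length : Int) 1).filter
          (fun j => pvGet2 b i j == 1)).map (fun j => (i, j))))
    ↔ (0 ≤ p ∧ p < (b.length : Int) ∧ 0 ≤ q ∧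
        q < ((PySem.List.pyGetD b 0 []).length : Int) ∧ pvGet2 b p q = 1) := by
  simp only [List.mem_flatMap, List.mem_map, List.mem_filter, PySem.List.mem_pyRange_one,
    Prod.mk.injEq, beq_iff_eq]
  constructor
  · rintro ⟨i, hi, j, ⟨⟨hj, hg⟩, rfl, rfl⟩⟩
    exact ⟨hi.1, hi.2, hj.1, hj.2, hg⟩
  · rintro ⟨h1, h2, h3, h4, h5⟩
    exact ⟨p, ⟨h1, h2⟩, q, ⟨⟨⟨h3, h4⟩, h5⟩, rfl, rfl⟩⟩

theorem fit_eq (b : List (List Int)) (sh : List (Int × Int)) (x y : Int) :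
    canPlace x y sh b = sh.all (fun d =>
      (PySem.Set.ofList ((PySem.List.pyRange 0 (b.length : Int) 1).flatMap (fun i =>
        ((PySem.List.pyRange 0 ((PySem.List.pyGetD b 0 []).length : Int) 1).filter
          (fun j => pvGet2 b i j == 1)).map (fun j => (i, j))))).contains (x + d.1, y + d.2)) := by
  rw [Bool.eq_iff_iff]
  rw [canPlace_iff, List.all_eq_true]
  apply forall_congr'; intro d
  apply imp_congr_right; intro _
  have hmem : (PySem.Set.ofList ((PySem.List.pyRange 0 (b.length : Int) 1).flatMap (fun i =>
        ((PySem.List.pyRange 0 ((PySem.List.pyGetD b 0 []).length : Int) 1).filter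
          (fun j => pvGet2 b i j == 1)).map (fun j => (i, j))))).contains (x + d.1, y + d.2) = true
      ↔ (x + d.1, y + d.2) ∈ ((PySem.List.pyRange 0 (b.length : Int) 1).flatMap (fun i =>
        ((PySem.List.pyRange 0 ((PySem.List.pyGetD b 0 []).length : Int) 1).filter
          (fun j => pvGet2 b i j == 1)).map (fun j => (i, j)))) := by
    rw [← PySem.Set.mem_ofList]
    simp [PySem.Set.contains]
  rw [hmem, mem_freelist]

theorem cells_eq (piece : List (List Int)) :
    ((PySem.List.pyRange 0 (piece.length : Int) 1).flatMap (fun x =>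
        (PySem.List.pyRange 0 ((PySem.List.pyGetD piece 0 []).length : Int) 1).map
          (fun y => (x, y)))).foldl
      (fun acc xy => if pvGet2 piece xy.1 xy.2 == 1 then acc ++ [xy] else acc) []
    = (PySem.List.pyRange 0 (piece.length : Int) 1).flatMap (fun x =>
        ((PySem.List.pyRange 0 ((PySem.List.pyGetD piece 0 []).length : Int) 1).filter
          (fun y => pvGet2 piece x y == 1)).map (fun y => (x, y))) := by
  rw [PySem.List.foldl_append_if (fun xy : Int × Int => pvGet2 piece xy.1 xy.2 == 1)
      (fun xy => xy)]
  simp [List.filter_flatMap, List.filter_map, Function.comp_def]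

-- ===== VERDICT (by name: the statement is the Claim_ definition above) =====
set_option maxHeartbeats 2000000 in
theorem backtrack_one_spec : Claim_equal_backtrack_one := by
  intro board piece _ hP
  obtain ⟨hbne, hbrow, hpne, hprow, hcell⟩ := hP
  simp only [Spec_backtrack_one, backtrack_one, backtrack_one_alt]
  rw [cells_eq piece]
  rw [btk_eq]
  set cells := (PySem.List.pyRange 0 (piece.length : Int) 1).flatMap (fun x =>
      ((PySem.List.pyRange 0 ((PySem.List.pyGetD piece 0 []).length : Int) 1).filter
        (fun y => pvGet2 piece x y == 1)).map (fun y => (x, y))) with hc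
  have hmain := (outer_char board hbrow (generateTransformations cells) 0 le_rfl
    (by norm_num)).1
  rw [hmain]
  rw [PySem.List.foldl_add]
  have hcong : ∀ sh, ((pvPositions board).countP (fun xy => canPlace xy.1 xy.2 sh board) : Int)
      = (((PySem.List.pyRange 0 (board.length : Int) 1).flatMap (fun x =>
          (PySem.List.pyRange 0 ((PySem.List.pyGetD board 0 []).length : Int) 1).map
            (fun y => (x, y)))).countP
        (fun xy => sh.all (fun d =>
          (PySem.Set.ofList ((PySem.List.pyRange 0 (board.length : Int) 1).flatMap (fun i =>
            ((PySem.List.pyRange 0 ((PySem.List.pyGetD board 0 []).length : Int) 1).filter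
              (fun j => pvGet2 board i j == 1)).map (fun j => (i, j))))).contains
            (xy.1 + d.1, xy.2 + d.2))) : Int) := by
    intro sh
    have h : (pvPositions board).countP (fun xy => canPlace xy.1 xy.2 sh board)
        = (pvPositions board).countP (fun xy => sh.all (fun d =>
            (PySem.Set.ofList ((PySem.List.pyRange 0 (board.length : Int) 1).flatMap (fun i =>
              ((PySem.List.pyRange 0 ((PySem.List.pyGetD board 0 []).length : Int) 1).filter
                (fun j => pvGet2 board i j == 1)).map (fun j => (i, j))))).contains
              (xy.1 + d.1, xy.2 + d.2))) :=
      List.countP_congr (fun xy _ => by rw [fit_eq board sh xy.1 xy.2])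
    exact congrArg Nat.cast h
  simp only [hcong]
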